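-- pv_equiv track=rewrite | github.com/MarcVillain/YoutubeWordCatcher | utils/subtitles.py | _concat_str
-- ===== SOURCE A (Python) =====
-- def _concat_str(str_a, str_b):
--     i = 0
--     while i < len(str_a):
--         j = i
--         k = 0
--         while True:
--             if j == len(str_a):
--                 return str_a[:i] + str_b
--             if k == len(str_b):
--                 return str_a
--             if str_a[j] != str_b[k]:
--                 break
--             k += 1
--             j += 1
--         i += 1
-- ===== SOURCE B (Python) =====
-- def _concat_str(str_a, str_b):
--     if not str_a:
--         return None
--     if not str_b:
--         return str_a
--     if str_b in str_a:
--         return str_a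
--     for k in range(min(len(str_a), len(str_b)), 0, -1):
--         if str_a.endswith(str_b[:k]):
--             return str_a[:-k] + str_b
--     return None
-- ===== Notes on version B (the rewrite author's own statement) =====
-- stated objective: idiomatic
-- what changed: Replaces A's hand-written nested character loops by the standard-library idiom: first check 'str_b in str_a' (substring -> return str_a), otherwise scan overlap lengths k from largest down with str_a.endswith(str_b[:k]) and return str_a[:-k]+str_b; falls out with None exactly where A does.
import Mathlib
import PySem

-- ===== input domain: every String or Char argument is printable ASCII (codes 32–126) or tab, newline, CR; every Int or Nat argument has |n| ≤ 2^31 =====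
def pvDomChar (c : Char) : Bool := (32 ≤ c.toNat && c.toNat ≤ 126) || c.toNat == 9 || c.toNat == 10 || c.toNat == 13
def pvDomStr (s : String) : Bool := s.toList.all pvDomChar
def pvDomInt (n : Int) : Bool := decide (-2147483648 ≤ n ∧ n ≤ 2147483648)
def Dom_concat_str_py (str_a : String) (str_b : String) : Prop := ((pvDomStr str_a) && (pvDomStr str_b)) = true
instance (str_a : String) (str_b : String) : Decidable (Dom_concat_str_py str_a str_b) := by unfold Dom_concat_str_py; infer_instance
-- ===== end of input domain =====

-- B replaces A's hand-written nested character loops by the idiomatic 'str_b in str_a' containment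
-- check plus a descending endswith scan over overlap lengths (same return value everywhere).

-- ===== PORT A =====
-- inner 'while True' loop of A: 'some r' is Python 'return r', 'none' is 'break';
-- the 'j == len(str_a)' test is written 'len(str_a) ≤ j' — j increases by 1 from i ≤ len,
-- so it is the same test on every reachable state (this form is needed for termination)
def concatInnerA (a b : List Char) (i j k : Nat) : Option (Option (List Char)) :=
  if a.length ≤ j then some (some (a.take i ++ b))
  else if k = b.length then some (some a)
  else if PySem.List.pyGet? a (j : Int) ≠ PySem.List.pyGet? b (k : Int) then none
  else concatInnerA a b i (j + 1) (k + 1)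
termination_by a.length - j
decreasing_by omega

-- outer 'while i < len(str_a)' loop of A; falling off the end is Python's implicit 'return None'
def concatOuterA (a b : List Char) (i : Nat) : Option (List Char) :=
  if _h : i < a.length then
    match concatInnerA a b i i 0 with
    | some r => r
    | none => concatOuterA a b (i + 1)
  else none
termination_by a.length - i
decreasing_by omega

def concat_str_py (str_a : String) (str_b : String) : Option String :=
  (concatOuterA str_a.toList str_b.toList 0).map (fun l => String.ofList l)

-- ===== PORT B =====
-- 'for k in range(min(len(str_a), len(str_b)), 0, -1): if str_a.endswith(str_b[:k]): return str_a[:-k] + str_b'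
def concatAltLoop (a b : List Char) (k : Nat) : Option (List Char) :=
  match k with
  | 0 => none
  | k + 1 =>
    if PySem.Chars.endswith a (b.take (k + 1)) then some (a.take (a.length - (k + 1)) ++ b)
    else concatAltLoop a b k

def concat_str_py_alt (str_a : String) (str_b : String) : Option String :=
  let a := str_a.toList
  let b := str_b.toList
  if a = [] then none
  else if b = [] then some str_a
  else if PySem.Chars.isIn b a then some str_a
  else (concatAltLoop a b (min a.length b.length)).map (fun l => String.ofList l)

-- ===== PRECONDITION & SPEC =====
def Spec_concat_str_py (str_a : String) (str_b : String) (out : Option String) : Prop := out = concat_str_py_alt str_a str_b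
instance (str_a : String) (str_b : String) (out : Option String) : Decidable (Spec_concat_str_py str_a str_b out) := by unfold Spec_concat_str_py; infer_instance

-- ===== CLAIM (what is proved, stated in full; the proofs are below) =====
def Claim_equal_concat_str_py : Prop := ∀ (str_a : String) (str_b : String), Dom_concat_str_py str_a str_b → Spec_concat_str_py str_a str_b (concat_str_py str_a str_b)

-- ===== LEMMAS AND PROOFS =====

-- characterization of the inner loop as a pair of prefix tests
theorem concatInnerA_eq (a b : List Char) (i j k : Nat) (hj : j ≤ a.length) (hk : k ≤ b.length) :
    concatInnerA a b i j k =
      if a.drop j <+: b.drop k then some (some (a.take i ++ b))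
      else if b.drop k <+: a.drop j then some (some a)
      else none := by
  fun_induction concatInnerA a b i j k with
  | case1 j k h =>
    have hje : j = a.length := le_antisymm hj h
    simp [hje, List.drop_length, List.nil_prefix]
  | case2 j h =>
    have hne : a.drop j ≠ [] := by simp [List.drop_eq_nil_iff]; omega
    rw [List.drop_length]
    rw [if_neg (by intro hpre; exact hne (List.prefix_nil.mp hpre)), if_pos List.nil_prefix]
  | case3 j k h hkb hne =>
    have hj' : j < a.length := by omega
    have hk' : k < b.length := by omega
    have hga : PySem.List.pyGet? a (j : Int) = some a[j] := by
      simp [PySem.List.pyGet?, PySem.List.pyIdx?, hj']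
    have hgb : PySem.List.pyGet? b (k : Int) = some b[k] := by
      simp [PySem.List.pyGet?, PySem.List.pyIdx?, hk']
    have hneq : a[j] ≠ b[k] := by
      intro hh; exact hne (by rw [hga, hgb, hh])
    have h1 : ¬ List.drop j a <+: List.drop k b := by
      rw [List.drop_eq_getElem_cons hj', List.drop_eq_getElem_cons hk', List.cons_prefix_cons]
      exact fun hc => hneq hc.1
    have h2 : ¬ List.drop k b <+: List.drop j a := by
      rw [List.drop_eq_getElem_cons hj', List.drop_eq_getElem_cons hk', List.cons_prefix_cons]
      exact fun hc => hneq hc.1.symm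
    rw [if_neg h1, if_neg h2]
  | case4 j k h hkb hne ih =>
    have hj' : j < a.length := by omega
    have hk' : k < b.length := by omega
    have hga : PySem.List.pyGet? a (j : Int) = some a[j] := by
      simp [PySem.List.pyGet?, PySem.List.pyIdx?, hj']
    have hgb : PySem.List.pyGet? b (k : Int) = some b[k] := by
      simp [PySem.List.pyGet?, PySem.List.pyIdx?, hk']
    have heq : a[j] = b[k] := by
      have h2 := not_not.mp (by exact fun hc => hne hc)
      rw [hga, hgb] at h2; exact Option.some.inj h2
    rw [ih (by omega) (by omega)]
    have e1 : (List.drop j a <+: List.drop k b) ↔ (List.drop (j+1) a <+: List.drop (k+1) b) := by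
      rw [List.drop_eq_getElem_cons hj', List.drop_eq_getElem_cons hk', List.cons_prefix_cons]
      simp [heq]
    have e2 : (List.drop k b <+: List.drop j a) ↔ (List.drop (k+1) b <+: List.drop (j+1) a) := by
      rw [List.drop_eq_getElem_cons hj', List.drop_eq_getElem_cons hk', List.cons_prefix_cons]
      simp [heq]
    simp only [e1, e2]

-- outer loop one-step unfolding through the inner characterization
theorem concatOuterA_step (a b : List Char) (i : Nat) :
    concatOuterA a b i =
      if i < a.length then
        (if a.drop i <+: b then some (a.take i ++ b)
         else if b <+: a.drop i then some a
         else concatOuterA a b (i + 1))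
      else none := by
  rw [concatOuterA]
  by_cases hi : i < a.length
  · rw [dif_pos hi, if_pos hi, concatInnerA_eq a b i i 0 (by omega) (by omega), List.drop_zero]
    by_cases h1 : a.drop i <+: b
    · rw [if_pos h1, if_pos h1]
    · rw [if_neg h1, if_neg h1]
      by_cases h2 : b <+: a.drop i
      · rw [if_pos h2, if_pos h2]
      · rw [if_neg h2, if_neg h2]
  · rw [dif_neg hi, if_neg hi]

theorem prefix_drop_infix (a b : List Char) (j : Nat) (h : b <+: a.drop j) : b <:+: a :=
  List.infix_iff_prefix_suffix.mpr ⟨a.drop j, h, List.drop_suffix j a⟩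

-- if b occurs as a prefix of some tail at position ≥ i, the outer loop returns a
theorem concatOuterA_of_occurs (a b : List Char) (i : Nat) (hb : b ≠ [])
    (h : ∃ j, i ≤ j ∧ b <+: a.drop j) : concatOuterA a b i = some a := by
  obtain ⟨j, hij, hpre⟩ := h
  have hjlen : j < a.length := by
    by_contra hc
    rw [List.drop_eq_nil_of_le (by omega)] at hpre
    exact hb (List.prefix_nil.mp hpre)
  have hi : i < a.length := by omega
  rw [concatOuterA_step, if_pos hi]
  by_cases h1 : a.drop i <+: b
  · rw [if_pos h1]
    -- lengths force j = i and b = a.drop i, so a.take i ++ b = a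
    have hlb : b.length ≤ a.length - j := hpre.length_le.trans_eq (by simp)
    have hla : a.length - i ≤ b.length := by
      have := h1.length_le; simp at this; omega
    have hj : j = i := by omega
    have heq : a.drop i = b := h1.eq_of_length (by simp; omega)
    rw [← heq, List.take_append_drop]
  · rw [if_neg h1]
    by_cases h2 : b <+: a.drop i
    · rw [if_pos h2]
    · rw [if_neg h2]
      have hji : j ≠ i := fun hc => h2 (hc ▸ hpre)
      exact concatOuterA_of_occurs a b (i + 1) hb ⟨j, by omega, hpre⟩
termination_by a.length - i
decreasing_by omega

-- endswith on a length-(k+1) prefix of b is the prefix test A performs at position len a - (k+1)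
theorem endswith_take_iff (a b : List Char) (k : Nat)
    (hka : k + 1 ≤ a.length) (hkb : k + 1 ≤ b.length) :
    (b.take (k + 1) <:+ a) ↔ (a.drop (a.length - (k + 1)) <+: b) := by
  have hlt : (b.take (k + 1)).length = k + 1 := by simp; omega
  have hld : (a.drop (a.length - (k + 1))).length = k + 1 := by simp; omega
  constructor
  · intro hs
    have := List.suffix_iff_eq_drop.mp hs
    rw [hlt] at this
    rw [← this]
    exact List.take_prefix _ _
  · intro hp
    have := List.prefix_iff_eq_take.mp hp
    rw [hld] at this
    rw [List.suffix_iff_eq_drop, hlt, ← this]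

-- with no occurrence of b inside a, the outer loop at position len a - k is B's k-loop
theorem concatOuterA_eq_altLoop (a b : List Char) (k : Nat)
    (hk : k ≤ min a.length b.length) (hno : ¬ b <:+: a) :
    concatOuterA a b (a.length - k) = concatAltLoop a b k := by
  induction k with
  | zero =>
    rw [concatAltLoop, concatOuterA_step, if_neg (by omega)]
  | succ k ih =>
    have hka : k + 1 ≤ a.length := by omega
    have hkb : k + 1 ≤ b.length := by omega
    have hi : a.length - (k + 1) < a.length := by omega
    rw [concatOuterA_step, if_pos hi, concatAltLoop]
    have hcond : PySem.Chars.endswith a (b.take (k + 1)) = true ↔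
        a.drop (a.length - (k + 1)) <+: b := by
      rw [PySem.Chars.endswith_iff]; exact endswith_take_iff a b k hka hkb
    by_cases h1 : a.drop (a.length - (k + 1)) <+: b
    · rw [if_pos h1, if_pos (hcond.mpr h1)]
    · rw [if_neg h1, if_neg (fun hc => h1 (hcond.mp hc))]
      rw [if_neg (fun hc => hno (prefix_drop_infix a b _ hc))]
      have : a.length - (k + 1) + 1 = a.length - k := by omega
      rw [this]
      exact ih (by omega)

-- with no occurrence, every position before len a - min falls through
theorem concatOuterA_skip (a b : List Char) (i : Nat)
    (hi : i ≤ a.length - min a.length b.length) (hno : ¬ b <:+: a) :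
    concatOuterA a b i = concatOuterA a b (a.length - min a.length b.length) := by
  rcases eq_or_lt_of_le hi with heq | hlt
  · rw [heq]
  · have hba : b.length < a.length := by
      rcases Nat.le_total a.length b.length with hc | hc
      · omega
      · omega
    have hilen : i < a.length := by omega
    rw [concatOuterA_step, if_pos hilen]
    have h1 : ¬ a.drop i <+: b := by
      intro hc
      have := hc.length_le
      simp at this
      omega
    have h2 : ¬ b <+: a.drop i := fun hc => hno (prefix_drop_infix a b i hc)
    rw [if_neg h1, if_neg h2]
    exact concatOuterA_skip a b (i + 1) (by omega) hno
termination_by a.length - i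
decreasing_by omega

-- ===== VERDICT (by name: the statement is the Claim_ definition above) =====
theorem concat_str_py_spec : Claim_equal_concat_str_py := by
  intro str_a str_b _hdom
  unfold Spec_concat_str_py concat_str_py concat_str_py_alt
  set a := str_a.toList with ha
  set b := str_b.toList with hb
  by_cases hae : a = []
  · rw [if_pos hae, hae, concatOuterA_step]
    simp
  · rw [if_neg hae]
    by_cases hbe : b = []
    · rw [if_pos hbe, concatOuterA_step,
        if_pos (List.length_pos_iff.mpr hae),
        if_neg (by rw [hbe]; intro hc; exact hae (List.prefix_nil.mp hc)),
        if_pos (by rw [hbe]; exact List.nil_prefix)]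
      simp [ha]
    · rw [if_neg hbe]
      by_cases hin : PySem.Chars.isIn b a
      · rw [if_pos hin]
        have hinf : b <:+: a := (PySem.Chars.isIn_iff_infix b a).mp hin
        obtain ⟨j, hj⟩ := (PySem.Chars.exists_prefix_drop_iff_isIn b a).2 hin
        rw [concatOuterA_of_occurs a b 0 hbe ⟨j, Nat.zero_le j, hj⟩]
        simp [ha]
      · rw [if_neg hin]
        have hno : ¬ b <:+: a := fun hc => hin ((PySem.Chars.isIn_iff_infix b a).mpr hc)
        rw [concatOuterA_skip a b 0 (by omega) hno,
          concatOuterA_eq_altLoop a b (min a.length b.length) (le_refl _) hno]
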